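-- pv_equiv track=rewrite | github.com/paulguy/cauzin_experiments | cauzin.py | select_strip
-- ===== SOURCE A (Python) =====
-- def select_strip(bit_strips):
--     # check available bit strips
--     # throw out ones with the wrong start/end patterns or bad parity
--     # if no candidates, fail (shouldn't happen?)
--     # if 1 candidate, select that
--     # if more, count how many of each unique candidate and pick the one with the most
--     # if ambiguous, fail
--     # in case of failure, go back to last decoded strip and try to resync angle
--
--     unique = {}
--     for bit_strip in range(len(bit_strips)):
--         found = False
--         for item in unique.keys():
--             if bit_strips[item] == bit_strips[bit_strip]:
--                 unique[item] += 1
--                 found = True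
--                 break
--         if not found:
--             unique[bit_strip] = 1
--
--     if len(unique) == 0:
--         # found no viable values, TODO: try angle resync
--         return None
--     elif len(unique) == 1:
--         # only 1 value, just use the first/only instance
--         for key in unique.keys():
--             return bit_strips[key]
--     else:
--         # find the highest value and hope it's unique, if not, TODO: try angle resync
--         highest = 0
--         highest_key = 0
--         highest_count = 0
--         for key in unique.keys():
--             if unique[key] == highest:
--                 highest_count += 1
--             elif unique[key] > highest:
--                 highest = unique[key]
--                 highest_key = key
--                 highest_count = 1
--
--         if highest_count > 1:
--             # ambiguous, error
--             return None
--
--     return bit_strips[highest_key]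
-- ===== SOURCE B (Python) =====
-- def select_strip(bit_strips):
--     # Count occurrences of each distinct strip in one pass (dict keyed by tuple),
--     # then pick the unique most-common one via max + filter.
--     counts = {}
--     for strip in bit_strips:
--         key = tuple(strip)
--         counts[key] = counts.get(key, 0) + 1
--     items = list(counts.items())
--     if not items:
--         return None
--     if len(items) == 1:
--         return list(items[0][0])
--     best = max(c for _, c in items)
--     winners = [k for k, c in items if c == best]
--     if len(winners) != 1:
--         return None
--     return list(winners[0])
-- ===== Notes on version B (the rewrite author's own statement) =====
-- stated objective: alternative
-- what changed: Replaces A's compare-against-every-seen-group grouping (inner scan over group representatives) and its accumulator-with-reset max loop by a one-pass counter dict keyed by the strip itself, then max over the counts plus a filter for the winners.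
import Mathlib
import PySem

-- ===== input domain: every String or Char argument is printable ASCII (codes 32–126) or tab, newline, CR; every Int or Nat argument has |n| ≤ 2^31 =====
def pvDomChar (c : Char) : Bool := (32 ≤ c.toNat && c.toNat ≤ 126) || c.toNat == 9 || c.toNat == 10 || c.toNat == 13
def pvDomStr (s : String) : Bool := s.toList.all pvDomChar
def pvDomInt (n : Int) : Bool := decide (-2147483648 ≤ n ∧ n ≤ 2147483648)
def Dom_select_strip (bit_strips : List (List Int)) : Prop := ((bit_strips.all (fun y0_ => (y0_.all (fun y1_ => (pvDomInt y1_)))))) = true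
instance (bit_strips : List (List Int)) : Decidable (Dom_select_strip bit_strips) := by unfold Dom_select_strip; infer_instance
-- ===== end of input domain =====

-- B replaces A's compare-against-every-seen-group grouping loop by a one-pass counter dict
-- keyed by the strip itself, then max + filter; objective: alternative.

-- ===== PORT A =====
-- one step of A's grouping loop: scan unique's keys for an equal strip, bump that count or add a new key
def pvStepA (bit_strips : List (List Int)) (d : PySem.Dict Int Int) (i : Int) : PySem.Dict Int Int :=
  match d.keys.find? (fun it => PySem.List.pyGet? bit_strips it == PySem.List.pyGet? bit_strips i) with
  | some it => d.insert it (d.getD it 0 + 1)   -- unique[item] += 1 (key is present)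
  | none => d.insert i 1

-- one step of A's highest/highest_key/highest_count loop (acc = (highest, highest_key, highest_count))
def pvStepMax (acc : Int × Int × Int) (kv : Int × Int) : Int × Int × Int :=
  if kv.2 == acc.1 then (acc.1, acc.2.1, acc.2.2 + 1)
  else if acc.1 < kv.2 then (kv.2, kv.1, 1)
  else acc

def select_strip (bit_strips : List (List Int)) : Option (List Int) :=
  let unique : PySem.Dict Int Int :=
    (PySem.List.pyRange 0 bit_strips.length 1).foldl (pvStepA bit_strips) PySem.Dict.empty
  if unique.size = 0 then none
  else if unique.size = 1 then
    match unique.keys with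
    | key :: _ => PySem.List.pyGet? bit_strips key
    | [] => none   -- unreachable: size = 1
  else
    let s := unique.keys.foldl (fun acc key => pvStepMax acc (key, unique.getD key 0)) (0, 0, 0)
    if s.2.2 > 1 then none
    else PySem.List.pyGet? bit_strips s.2.1

-- ===== PORT B =====
-- tuple(strip) is the strip itself as key; counts[key] = counts.get(key, 0) + 1
def pvStepB (c : PySem.Dict (List Int) Int) (strip : List Int) : PySem.Dict (List Int) Int :=
  c.insert strip (c.getD strip 0 + 1)

def select_strip_alt (bit_strips : List (List Int)) : Option (List Int) :=
  let counts := bit_strips.foldl pvStepB PySem.Dict.empty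
  match counts.items with
  | [] => none
  | [(k, _)] => some k
  | p :: q :: rest =>
    let items := p :: q :: rest
    let best := (q :: rest).foldl (fun m r => max m r.2) p.2   -- max(c for _, c in items)
    let winners := (items.filter (fun r => r.2 == best)).map (·.1)
    if winners.length == 1 then winners.head? else none

-- ===== PRECONDITION & SPEC =====
def Spec_select_strip (bit_strips : List (List Int)) (out : Option (List Int)) : Prop := out = select_strip_alt bit_strips
instance (bit_strips : List (List Int)) (out : Option (List Int)) : Decidable (Spec_select_strip bit_strips out) := by unfold Spec_select_strip; infer_instance

-- ===== CLAIM (what is proved, stated in full; the proofs are below) =====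
def Claim_equal_select_strip : Prop := ∀ (bit_strips : List (List Int)), Dom_select_strip bit_strips → Spec_select_strip bit_strips (select_strip bit_strips)

-- ===== LEMMAS AND PROOFS =====

-- the strip sitting at (valid) index k
def pvStrip (bs : List (List Int)) (k : Int) : List Int := (PySem.List.pyGet? bs k).getD []

def pvF (bs : List (List Int)) (p : Int × Int) : List Int × Int := (pvStrip bs p.1, p.2)

-- invariant after A processed indices [0, a) and B the first a strips
def pvInv (bs : List (List Int)) (a : Nat) (d : PySem.Dict Int Int) (c : PySem.Dict (List Int) Int) : Prop :=
  d.keys.Nodup ∧ c.keys.Nodup ∧ c.items = d.items.map (pvF bs) ∧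
  ∀ p ∈ d.items, 0 ≤ p.1 ∧ p.1 < (a : Int) ∧ 1 ≤ p.2

lemma pvStep_rel (bs : List (List Int)) (a : Nat) (x : List Int)
    (d : PySem.Dict Int Int) (c : PySem.Dict (List Int) Int)
    (hx : bs[a]? = some x) (hinv : pvInv bs a d c) :
    pvInv bs (a+1) (pvStepA bs d (a : Int)) (pvStepB c x) := by
  obtain ⟨hnd, hnc, hmap, hbnd⟩ := hinv
  have halen : a < bs.length := (List.getElem?_eq_some_iff.1 hx).1
  have hgetA : PySem.List.pyGet? bs (a : Int) = some x := by
    rw [PySem.List.pyGet?_natCast]; exact hx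
  have hstripa : pvStrip bs (a : Int) = x := by simp [pvStrip, hgetA]
  have hkeys : d.keys = d.items.map (·.1) := rfl
  have hckeys : c.keys = c.items.map (·.1) := rfl
  have hget : ∀ p ∈ d.items, PySem.List.pyGet? bs p.1 = some (pvStrip bs p.1) := by
    intro p hp
    obtain ⟨h0, hlt, -⟩ := hbnd p hp
    rw [PySem.List.pyGet?_eq_some_getElem bs h0 (by exact_mod_cast lt_of_lt_of_le hlt (by exact_mod_cast Nat.le_of_lt halen))]
    simp [pvStrip, PySem.List.pyGet?_eq_some_getElem bs h0
      (by exact_mod_cast lt_of_lt_of_le hlt (by exact_mod_cast Nat.le_of_lt halen))]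
  have hinj : ∀ p ∈ d.items, ∀ q ∈ d.items, pvStrip bs p.1 = pvStrip bs q.1 → p = q := by
    have hnodup : (d.items.map (fun p => pvStrip bs p.1)).Nodup := by
      have := hnc
      rw [hckeys, hmap, List.map_map] at this
      simpa [Function.comp, pvF] using this
    intro p hp q hq hpq
    exact List.inj_on_of_nodup_map hnodup hp hq hpq
  unfold pvStepA pvStepB
  cases hfind : d.keys.find? (fun it => PySem.List.pyGet? bs it == PySem.List.pyGet? bs (a : Int)) with
  | some it =>
    have hpred := List.find?_some hfind
    have hmem : it ∈ d.keys := List.mem_of_find?_eq_some hfind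
    rw [hkeys] at hmem
    obtain ⟨p0, hp0, hp0k⟩ := List.mem_map.1 hmem
    have hitem : PySem.List.pyGet? bs it = some x := by
      rw [hgetA] at hpred
      have h1 := hget _ hp0
      rw [hp0k] at h1
      rw [h1] at hpred
      rw [h1]
      exact congrArg some (by simpa using hpred)
    have hstripi : pvStrip bs it = x := by simp [pvStrip, hitem]
    have hp0' : (it, p0.2) ∈ d.items := by
      have : (it, p0.2) = p0 := by
        cases p0; simp only at hp0k; simp [hp0k]
      rw [this]; exact hp0
    have hdgetD : d.getD it 0 = p0.2 := PySem.Dict.getD_of_mem_items d hp0' hnd 0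
    have hcx : (x, p0.2) ∈ c.items := by
      rw [hmap]
      exact List.mem_map.2 ⟨p0, hp0, by simp [pvF]; rw [hp0k]; exact hstripi⟩
    have hcgetD : c.getD x 0 = p0.2 := PySem.Dict.getD_of_mem_items c hcx hnc 0
    have hdcont : d.contains it = true := by
      rw [PySem.Dict.contains_eq_decide_mem_keys, hkeys]
      simp only [decide_eq_true_eq]
      exact List.mem_map.2 ⟨_, hp0, hp0k⟩
    have hccont : c.contains x = true := by
      rw [PySem.Dict.contains_eq_decide_mem_keys]
      simp only [decide_eq_true_eq]
      rw [hckeys]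
      exact List.mem_map.2 ⟨_, hcx, rfl⟩
    refine ⟨?_, ?_, ?_, ?_⟩
    · rw [PySem.Dict.keys_insert_of_contains d _ hdcont]; exact hnd
    · rw [PySem.Dict.keys_insert_of_contains c _ hccont]; exact hnc
    · rw [PySem.Dict.items_insert_of_contains d _ hdcont,
          PySem.Dict.items_insert_of_contains c _ hccont, hmap,
          List.map_map, List.map_map]
      refine List.map_congr_left ?_
      intro p hp
      simp only [Function.comp]
      by_cases hpi : p.1 = it
      · have hpp0 : p = p0 := by
          refine hinj p hp p0 hp0 ?_
          rw [hpi, hp0k]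
        subst hpp0
        simp [pvF, hpi, hstripi, hdgetD, hcgetD]
      · have hne : pvStrip bs p.1 ≠ x := by
          intro hcontra
          have heq : p = p0 := by
            refine hinj p hp p0 hp0 ?_
            rw [hcontra, hp0k, hstripi]
          exact hpi (by rw [heq, hp0k])
        simp [pvF, hpi, hne]
    · intro p hp
      rcases (PySem.Dict.mem_items_insert d it _ p).1 hp with rfl | ⟨hpold, -⟩
      · obtain ⟨h0, hlt, hv⟩ := hbnd _ hp0'
        exact ⟨h0, by push_cast; omega, by omega⟩
      · obtain ⟨h0, hlt, hv⟩ := hbnd p hpold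
        exact ⟨h0, by push_cast; omega, hv⟩
  | none =>
    have hnall := List.find?_eq_none.1 hfind
    have hnotx : ∀ p ∈ d.items, pvStrip bs p.1 ≠ x := by
      intro p hp hcontra
      have hpk : p.1 ∈ d.keys := by rw [hkeys]; exact List.mem_map.2 ⟨_, hp, rfl⟩
      have h2 := hnall _ hpk
      rw [hget p hp, hgetA, hcontra] at h2
      simp at h2
    have hdcont : d.contains (a : Int) = false := by
      rw [PySem.Dict.contains_eq_decide_mem_keys]
      simp only [decide_eq_false_iff_not]
      rw [hkeys]
      intro hmem
      obtain ⟨p, hp, hpk⟩ := List.mem_map.1 hmem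
      obtain ⟨-, hlt, -⟩ := hbnd p hp
      omega
    have hccont : c.contains x = false := by
      rw [PySem.Dict.contains_eq_decide_mem_keys]
      simp only [decide_eq_false_iff_not]
      rw [hckeys, hmap, List.map_map]
      intro hmem
      obtain ⟨p, hp, hpk⟩ := List.mem_map.1 hmem
      exact hnotx p hp (by simpa [Function.comp, pvF] using hpk)
    refine ⟨?_, ?_, ?_, ?_⟩
    · rw [PySem.Dict.keys_insert_of_not_contains d _ hdcont]
      refine List.Nodup.append hnd (List.nodup_singleton _) ?_
      intro k hk hk1
      rw [List.mem_singleton] at hk1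
      subst hk1
      rw [hkeys] at hk
      obtain ⟨p, hp, hpk⟩ := List.mem_map.1 hk
      obtain ⟨-, hlt, -⟩ := hbnd p hp
      omega
    · rw [PySem.Dict.keys_insert_of_not_contains c _ hccont]
      refine List.Nodup.append hnc (List.nodup_singleton _) ?_
      intro k hk hk1
      rw [List.mem_singleton] at hk1
      subst hk1
      rw [hckeys, hmap, List.map_map] at hk
      obtain ⟨p, hp, hpk⟩ := List.mem_map.1 hk
      exact hnotx p hp (by simpa [Function.comp, pvF] using hpk)
    · rw [PySem.Dict.items_insert_of_not_contains d _ hdcont,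
          PySem.Dict.items_insert_of_not_contains c _ hccont, hmap, List.map_append,
          PySem.Dict.getD_of_not_contains c 0 hccont]
      simp [pvF, hstripa]
    · intro p hp
      rw [PySem.Dict.items_insert_of_not_contains d _ hdcont, List.mem_append] at hp
      rcases hp with hp | hp
      · obtain ⟨h0, hlt, hv⟩ := hbnd p hp
        exact ⟨h0, by push_cast; omega, hv⟩
      · rw [List.mem_singleton] at hp
        subst hp
        exact ⟨by positivity, by push_cast; omega, le_refl _⟩

lemma pvLoop_rel (bs : List (List Int)) :
    ∀ (rest : List (List Int)) (a : Nat) (d : PySem.Dict Int Int) (c : PySem.Dict (List Int) Int),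
      a ≤ bs.length → bs.drop a = rest → pvInv bs a d c →
      pvInv bs bs.length
        ((PySem.List.pyRange (a : Int) (bs.length : Int) 1).foldl (pvStepA bs) d)
        (rest.foldl pvStepB c) := by
  intro rest
  induction rest with
  | nil =>
    intro a d c ha hdrop hinv
    have hlen : bs.length ≤ a := List.drop_eq_nil_iff.1 hdrop
    have haa : a = bs.length := le_antisymm ha hlen
    subst haa
    rw [PySem.List.pyRange_one_eq_nil (le_refl _)]
    exact hinv
  | cons y rest' ih =>
    intro a d c ha hdrop hinv
    have hlt : a < bs.length := by
      by_contra hcon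
      rw [List.drop_eq_nil_iff.2 (by omega)] at hdrop
      simp at hdrop
    have hy : bs[a]? = some y := by
      rw [← List.head?_drop, hdrop]; rfl
    have hdrop' : bs.drop (a+1) = rest' := by
      rw [← List.tail_drop, hdrop]; rfl
    rw [PySem.List.pyRange_one_cons (show (a : Int) < (bs.length : Int) by exact_mod_cast hlt),
        List.foldl_cons, List.foldl_cons]
    have hstep := pvStep_rel bs a y d c hy hinv
    have hfin := ih (a+1) _ _ (by omega) hdrop' hstep
    have hcast : ((a : Int) + 1) = ((a + 1 : Nat) : Int) := by push_cast; ring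
    rw [hcast]
    exact hfin

-- running maximum of the counts
def pvM (items : List (Int × Int)) (h : Int) : Int := items.foldl (fun m p => max m p.2) h

lemma pvM_cons (q : Int × Int) (t : List (Int × Int)) (h : Int) :
    pvM (q :: t) h = pvM t (max h q.2) := rfl

lemma pvM_ge (items : List (Int × Int)) (h : Int) : h ≤ pvM items h := by
  induction items generalizing h with
  | nil => exact le_refl _
  | cons q t ih => exact le_trans (le_max_left _ _) (ih (max h q.2))

lemma pvM_ge_mem (items : List (Int × Int)) (h : Int) (p : Int × Int) (hp : p ∈ items) :
    p.2 ≤ pvM items h := by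
  induction items generalizing h with
  | nil => cases hp
  | cons q t ih =>
    rcases List.mem_cons.1 hp with rfl | hp'
    · exact le_trans (le_max_right _ _) (pvM_ge t _)
    · exact ih _ hp'

lemma pvM_attain (items : List (Int × Int)) (h : Int) :
    pvM items h = h ∨ ∃ p ∈ items, p.2 = pvM items h := by
  induction items generalizing h with
  | nil => exact Or.inl rfl
  | cons q t ih =>
    rw [pvM_cons]
    rcases ih (max h q.2) with heq | ⟨p, hp, hpv⟩
    · rcases le_total h q.2 with hle | hle
      · exact Or.inr ⟨q, List.mem_cons_self, by rw [heq]; exact (max_eq_right hle).symm⟩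
      · exact Or.inl (by rw [heq]; exact max_eq_left hle)
    · exact Or.inr ⟨p, List.mem_cons_of_mem _ hp, hpv⟩

lemma pvStepMax_spec (items : List (Int × Int)) (h hk hc : Int) :
    items.foldl pvStepMax (h, hk, hc) =
      (pvM items h,
       if h < pvM items h then ((items.find? (fun p => p.2 == pvM items h)).map Prod.fst).getD hk else hk,
       if h < pvM items h then (items.countP (fun p => p.2 == pvM items h) : Int)
       else hc + (items.countP (fun p => p.2 == h) : Int)) := by
  induction items generalizing h hk hc with
  | nil => simp [pvM]
  | cons q t ih =>
    rw [List.foldl_cons, pvM_cons]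
    by_cases hq : q.2 = h
    · have hstep : pvStepMax (h, hk, hc) q = (h, hk, hc + 1) := by
        simp [pvStepMax, hq]
      rw [hstep, ih, hq, max_self]
      have hM := pvM_ge t h
      refine Prod.ext rfl (Prod.ext ?_ ?_) <;> simp only
      · by_cases hlt : h < pvM t h
        · have hne : ¬ (h == pvM t h) = true := by simp; omega
          simp [hlt, hq, hne]
        · simp [hlt]
      · by_cases hlt : h < pvM t h
        · have hne : ¬ (h == pvM t h) = true := by simp; omega
          simp [hlt, hq, hne]
        · have hMh : pvM t h = h := le_antisymm (by omega) hM
          simp [hq, hMh]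
          omega
    · by_cases hlt : h < q.2
      · have hstep : pvStepMax (h, hk, hc) q = (q.2, q.1, 1) := by
          simp [pvStepMax, hq, hlt]
        rw [hstep, ih]
        have hmax : max h q.2 = q.2 := max_eq_right (le_of_lt hlt)
        rw [hmax]
        have hM := pvM_ge t q.2
        refine Prod.ext rfl (Prod.ext ?_ ?_) <;> simp only
        · by_cases hlt2 : q.2 < pvM t q.2
          · have hne : ¬ (q.2 == pvM t q.2) = true := by simp; omega
            have hfind : (t.find? (fun p => p.2 == pvM t q.2)).isSome = true := by
              rcases pvM_attain t q.2 with heq | ⟨p, hp, hpv⟩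
              · omega
              · exact List.find?_isSome.2 ⟨p, hp, by simp [hpv]⟩
            rcases Option.isSome_iff_exists.1 hfind with ⟨w, hw⟩
            simp [hlt2, hne, lt_trans hlt hlt2, hw]
          · have hMq : pvM t q.2 = q.2 := le_antisymm (by omega) hM
            simp [hlt, hMq]
        · by_cases hlt2 : q.2 < pvM t q.2
          · have hne : ¬ (q.2 == pvM t q.2) = true := by simp; omega
            simp [hlt2, hne, lt_trans hlt hlt2]
          · have hMq : pvM t q.2 = q.2 := le_antisymm (by omega) hM
            simp [hlt, hMq]
            omega
      · have hqlt : q.2 < h := lt_of_le_of_ne (by omega) hq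
        have hstep : pvStepMax (h, hk, hc) q = (h, hk, hc) := by
          simp [pvStepMax, hq, hlt]
        rw [hstep, ih]
        have hmax : max h q.2 = h := max_eq_left (le_of_lt hqlt)
        rw [hmax]
        have hM := pvM_ge t h
        refine Prod.ext rfl (Prod.ext ?_ ?_) <;> simp only
        · by_cases hlt2 : h < pvM t h
          · have hne : ¬ (q.2 == pvM t h) = true := by simp; omega
            simp [hlt2, hne]
          · simp [hlt2]
        · by_cases hlt2 : h < pvM t h
          · have hne : ¬ (q.2 == pvM t h) = true := by simp; omega
            simp [hlt2, hne]
          · have hne : ¬ (q.2 == h) = true := by simp; omega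
            simp [hlt2, hne]

lemma pvMain (bs : List (List Int)) : select_strip bs = select_strip_alt bs := by
  have h0 : pvInv bs 0 PySem.Dict.empty PySem.Dict.empty := by
    exact ⟨PySem.Dict.nodup_keys_empty, PySem.Dict.nodup_keys_empty, rfl, by intro p hp; cases hp⟩
  have hInv : pvInv bs bs.length
      ((PySem.List.pyRange 0 (bs.length : Int) 1).foldl (pvStepA bs) PySem.Dict.empty)
      (bs.foldl pvStepB PySem.Dict.empty) := by
    simpa using pvLoop_rel bs bs 0 PySem.Dict.empty PySem.Dict.empty (Nat.zero_le _) (by simp) h0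
  set D := (PySem.List.pyRange 0 (bs.length : Int) 1).foldl (pvStepA bs) PySem.Dict.empty with hD
  set C := bs.foldl pvStepB PySem.Dict.empty with hC
  obtain ⟨hnd, hnc, hmap, hbnd⟩ := hInv
  have hget : ∀ p ∈ D.items, PySem.List.pyGet? bs p.1 = some (pvStrip bs p.1) := by
    intro p hp
    obtain ⟨hp0, hp1, -⟩ := hbnd p hp
    rw [PySem.List.pyGet?_eq_some_getElem bs hp0 hp1]
    simp [pvStrip, PySem.List.pyGet?_eq_some_getElem bs hp0 hp1]
  have hsz : D.size = D.items.length := rfl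
  have hkeys : D.keys = D.items.map (·.1) := rfl
  show (if D.size = 0 then none
    else if D.size = 1 then
      match D.keys with
      | key :: _ => PySem.List.pyGet? bs key
      | [] => none
    else
      let s := D.keys.foldl (fun acc key => pvStepMax acc (key, D.getD key 0)) (0, 0, 0)
      if s.2.2 > 1 then none
      else PySem.List.pyGet? bs s.2.1) =
    (match C.items with
    | [] => none
    | [(k, _)] => some k
    | p :: q :: rest =>
      let items := p :: q :: rest
      let best := (q :: rest).foldl (fun m r => max m r.2) p.2
      let winners := (items.filter (fun r => r.2 == best)).map (·.1)
      if winners.length == 1 then winners.head? else none)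
  cases hitems : D.items with
  | nil =>
    have hcit : C.items = [] := by rw [hmap, hitems]; rfl
    simp [hsz, hitems, hcit]
  | cons p1 tl =>
    cases tl with
    | nil =>
      have hcit : C.items = [pvF bs p1] := by rw [hmap, hitems]; rfl
      have hkey1 : D.keys = [p1.1] := by rw [hkeys, hitems]; rfl
      rw [hcit, hkey1]
      simp only [hsz, hitems, List.length_cons, List.length_nil]
      norm_num
      rw [hget p1 (by rw [hitems]; exact List.mem_cons_self)]
      simp [pvF]
    | cons p2 tl' =>
      -- A's max loop over keys equals the fold over items
      have hfold : D.keys.foldl (fun acc key => pvStepMax acc (key, D.getD key 0)) (0, 0, 0)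
          = D.items.foldl pvStepMax (0, 0, 0) := by
        rw [PySem.Dict.items_eq_map_keys D hnd 0, List.foldl_map]
      set M := pvM D.items 0 with hMdef
      have hval1 : 1 ≤ p1.2 := (hbnd p1 (by rw [hitems]; exact List.mem_cons_self)).2.2
      have hMpos : 0 < M := lt_of_lt_of_le hval1
        (pvM_ge_mem D.items 0 p1 (by rw [hitems]; exact List.mem_cons_self))
      have hspec := pvStepMax_spec D.items 0 0 0
      rw [← hMdef] at hspec
      simp only [hMpos, if_pos, zero_add] at hspec
      -- count of the maximum is positive
      have hattain : ∃ p ∈ D.items, p.2 = M := by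
        rcases pvM_attain D.items 0 with heq | hex
        · omega
        · exact hex
      have hcnt_pos : 0 < D.items.countP (fun p => p.2 == M) := by
        obtain ⟨p, hp, hpv⟩ := hattain
        exact List.countP_pos_iff.2 ⟨p, hp, by simp [hpv]⟩
      have hbest : (tl'.map (pvF bs)).foldl (fun m r => max m r.2) (max (pvF bs p1).2 (pvF bs p2).2) = M := by
        have hmax12 : max (pvF bs p1).2 (pvF bs p2).2 = max p1.2 p2.2 := rfl
        rw [hmax12, List.foldl_map]
        have h2 : ∀ (l : List (Int × Int)) (m : Int),
            l.foldl (fun m r => max m (pvF bs r).2) m = l.foldl (fun m p => max m p.2) m := by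
          intro l
          induction l with
          | nil => intro m; rfl
          | cons a t ih => intro m; rw [List.foldl_cons, List.foldl_cons, ih]; rfl
        rw [h2]
        have hM2 : M = pvM tl' (max (max 0 p1.2) p2.2) := by rw [hMdef, hitems]; rfl
        have hm0 : max (0:Int) p1.2 = p1.2 := max_eq_right (by omega)
        rw [hM2, hm0]
        rfl
      have hcit : C.items = pvF bs p1 :: pvF bs p2 :: tl'.map (pvF bs) := by
        rw [hmap, hitems]; rfl
      rw [hcit]
      simp only [hsz, hitems, List.length_cons]
      norm_num
      rw [hfold, hspec, hbest]
      have hfilt : (pvF bs p1 :: pvF bs p2 :: tl'.map (pvF bs)) = (p1 :: p2 :: tl').map (pvF bs) := by simp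
      rw [hfilt, ← hitems]
      have hlenf : (List.filter (fun r => r.2 == M) (D.items.map (pvF bs))).length
          = D.items.countP (fun p => p.2 == M) := by
        rw [← List.countP_eq_length_filter, List.countP_map]
        rfl
      have hfind2 : List.find? (fun r => r.2 == M) (D.items.map (pvF bs))
          = (D.items.find? (fun p => p.2 == M)).map (pvF bs) := by
        rw [List.find?_map]
        rfl
      rw [hlenf, hfind2]
      by_cases hone : D.items.countP (fun p => p.2 == M) = 1
      · have hfindSome : (D.items.find? (fun p => p.2 == M)).isSome = true := by
          obtain ⟨p, hp, hpv⟩ := hattain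
          exact List.find?_isSome.2 ⟨p, hp, by simp [hpv]⟩
        rcases Option.isSome_iff_exists.1 hfindSome with ⟨pstar, hpstar⟩
        have hpmem : pstar ∈ D.items := List.mem_of_find?_eq_some hpstar
        rw [hpstar, hone]
        simp only [Option.map_some, Option.getD_some]
        norm_num
        rw [hget pstar hpmem]
        rfl
      · have hgt : (1:Int) < (D.items.countP (fun p => p.2 == M) : Int) := by
          have h1 := hcnt_pos
          omega
        rw [if_pos hgt, if_neg (by simpa using hone)]

-- ===== VERDICT (by name: the statement is the Claim_ definition above) =====
theorem select_strip_spec : Claim_equal_select_strip := by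
  intro bs _hdom
  unfold Spec_select_strip
  exact pvMain bs
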